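-- pv_equiv track=rewrite | github.com/rebryant/unsat-tutorial | instructor/lab2/generators/mdpcheck.py | getVariables
-- ===== SOURCE A (Python) =====
-- def getVariables(line):
--     vlist = []
--     started = False
--     for field in line.split():
--         if not started and field[-1] == ":":
--             started = True
--         elif started:
--             try:
--                 val = int(field)
--                 vlist.append(val)
--             except:
--                 return None
--     return vlist
-- ===== SOURCE B (Python) =====
-- def getVariables(line):
--     def go(fields):
--         if not fields:
--             return []
--         head, *rest = fields
--         if head.endswith(":"):
--             try:
--                 return [int(f) for f in rest]
--             except ValueError:
--                 return None
--         return go(rest)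
--     return go(line.split())
-- ===== Notes on version B (the rewrite author's own statement) =====
-- stated objective: alternative
-- what changed: Replaces A's flag-carrying accumulator loop with a recursive search for the colon-terminated field whose base case converts the whole remaining tail at once via a list comprehension inside a single try/except; no mutable flag, no accumulator, no element-by-element early return.
import Mathlib
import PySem

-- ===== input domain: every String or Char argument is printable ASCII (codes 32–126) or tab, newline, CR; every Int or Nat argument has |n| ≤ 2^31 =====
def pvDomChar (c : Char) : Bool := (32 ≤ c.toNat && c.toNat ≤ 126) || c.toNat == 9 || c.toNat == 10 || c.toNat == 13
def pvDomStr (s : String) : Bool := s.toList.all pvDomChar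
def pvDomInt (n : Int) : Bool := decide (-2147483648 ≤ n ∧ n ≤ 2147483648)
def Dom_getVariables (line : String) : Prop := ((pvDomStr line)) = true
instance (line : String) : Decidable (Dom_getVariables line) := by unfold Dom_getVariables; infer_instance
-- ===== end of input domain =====

-- B replaces A's flag-carrying accumulator loop with a recursive search whose base case
-- converts the whole tail at once (comprehension inside one try); same cost, alternative shape.

-- ===== PORT A =====
-- A's single loop over the split fields, carrying the `started` flag and the accumulator.
def getVariablesLoopA : List String → List Int → Bool → Option (List Int)
  | [], vlist, _ => some vlist
  | f :: rest, vlist, started =>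
    if !started && (PySem.Str.pyGet? f (-1) == some ':') then
      getVariablesLoopA rest vlist true
    else if started then
      match PySem.Int.ofStr? f with
      | some v => getVariablesLoopA rest (vlist ++ [v]) started
      | none => none
    else
      getVariablesLoopA rest vlist started

def getVariables (line : String) : Option (List Int) :=
  getVariablesLoopA (PySem.Str.split₀ line) [] false

-- ===== PORT B =====
-- B's recursive search: on the first field ending in ':', convert the whole remaining tail
-- at once (the comprehension inside one try = mapM over int()); otherwise recurse.
def goB : List String → Option (List Int)
  | [] => some []
  | head :: rest =>
    if PySem.Str.endswith head ":" then
      rest.mapM PySem.Int.ofStr?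
    else
      goB rest

def getVariables_alt (line : String) : Option (List Int) :=
  goB (PySem.Str.split₀ line)

-- ===== PRECONDITION & SPEC =====
def Spec_getVariables (line : String) (out : Option (List Int)) : Prop := out = getVariables_alt line
instance (line : String) (out : Option (List Int)) : Decidable (Spec_getVariables line out) := by unfold Spec_getVariables; infer_instance

-- ===== CLAIM =====
def Claim_equal_getVariables : Prop := ∀ (line : String), Dom_getVariables line → Spec_getVariables line (getVariables line)

-- ===== LEMMAS AND PROOFS =====

-- A's condition field[-1] == ":" agrees with B's field.endswith(":") on every string.
lemma colon_cond_eq (f : String) :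
    (PySem.Str.pyGet? f (-1) == some ':') = PySem.Str.endswith f ":" := by
  simp only [PySem.Str.pyGet?_eq, PySem.Str.endswith_eq, PySem.Chars.pyGet?_eq_listPyGet?]
  induction f.toList using List.reverseRecOn with
  | nil => rfl
  | append_singleton ys y _ =>
    rw [show ((":" : String).toList) = [':'] from rfl,
      PySem.List.pyGet?_neg_one_append_singleton]
    rcases eq_or_ne y ':' with h | h
    · subst h
      simp only [beq_self_eq_true]
      exact ((PySem.Chars.endswith_iff _ _).2 (List.suffix_append ys [':'])).symm
    · have hns : ¬ ([':'] <:+ ys ++ [y]) := by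
        intro hs
        rcases hs with ⟨t, ht⟩
        have := congrArg (fun l => l.getLast?) ht
        simp at this
        exact h this.symm
      have h2 : PySem.Chars.endswith (ys ++ [y]) [':'] = false := by
        cases hb : PySem.Chars.endswith (ys ++ [y]) [':'] with
        | true => exact absurd ((PySem.Chars.endswith_iff _ _).1 hb) hns
        | false => rfl
      simp [h2, h]

-- Once started, A's element-by-element loop computes mapM of int() prefixed by the accumulator.
lemma loopA_started (fs : List String) (acc : List Int) :
    getVariablesLoopA fs acc true = (fs.mapM PySem.Int.ofStr?).map (acc ++ ·) := by
  induction fs generalizing acc with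
  | nil => simp [getVariablesLoopA]
  | cons f rest ih =>
    simp only [getVariablesLoopA, Bool.not_true, Bool.false_and, if_true, List.mapM_cons]
    cases h : PySem.Int.ofStr? f with
    | none => simp
    | some v =>
      simp only [ih]
      cases rest.mapM PySem.Int.ofStr? <;> simp

-- Before a colon field is seen, A skips fields exactly where B's recursion skips them.
lemma loopA_not_started (fs : List String) :
    getVariablesLoopA fs [] false = goB fs := by
  induction fs with
  | nil => rfl
  | cons f rest ih =>
    simp only [getVariablesLoopA, goB, Bool.not_false, Bool.true_and, colon_cond_eq]
    by_cases h : PySem.Str.endswith f ":" = true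
    · rw [if_pos h, if_pos h, loopA_started]
      cases rest.mapM PySem.Int.ofStr? <;> simp
    · rw [if_neg h, if_neg h]
      exact ih

-- ===== VERDICT =====
theorem getVariables_spec : Claim_equal_getVariables := by
  intro line _
  unfold Spec_getVariables getVariables getVariables_alt
  exact loopA_not_started _
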